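-- pv_equiv track=rewrite | github.com/pzalews/aoc2023 | day01/star2.py | edigit
-- ===== SOURCE A (Python) =====
-- def edigit(s: str):
--     digits = []
--     for a in range(0, len(s)):
--         if s[a].isdigit():
--             digits.append(int(s[a]))
--         elif s[a:].startswith('one'):
--             digits.append(1)
--         elif s[a:].startswith('two'):
--             digits.append(2)
--         elif s[a:].startswith('three'):
--             digits.append(3)
--         elif s[a:].startswith('four'):
--             digits.append(4)
--         elif s[a:].startswith('five'):
--             digits.append(5)
--         elif s[a:].startswith('six'):
--             digits.append(6)
--         elif s[a:].startswith('seven'):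
--             digits.append(7)
--         elif s[a:].startswith('eight'):
--             digits.append(8)
--         elif s[a:].startswith('nine'):
--             digits.append(9)
--         elif s[a:].startswith('zero'):
--             digits.append(0)
--     return digits
-- ===== SOURCE B (Python) =====
-- WORDS = {'one': 1, 'two': 2, 'three': 3, 'four': 4, 'five': 5,
--          'six': 6, 'seven': 7, 'eight': 8, 'nine': 9, 'zero': 0}
--
--
-- def edigit(s: str):
--     # collect (index, value) pairs: digit chars first, then every
--     # occurrence of each spelled-out word; sort by index at the end
--     pairs = [(i, int(c)) for i, c in enumerate(s) if c.isdigit()]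
--     for w, v in WORDS.items():
--         for i in range(len(s)):
--             if s.startswith(w, i):
--                 pairs.append((i, v))
--     pairs = sorted(pairs, key=lambda p: p[0])
--     return [v for _, v in pairs]
-- ===== Notes on version B (the rewrite author's own statement) =====
-- stated objective: faster
-- what changed: Instead of one left-to-right pass that copies the suffix s[a:] to test every token at each position, B inverts the loop nesting: it collects (index, value) pairs per token (digit chars via enumerate, each spelled word via its own position scan using copy-free startswith(w, i)), then sorts the pairs by index and projects the values.
import Mathlib
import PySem

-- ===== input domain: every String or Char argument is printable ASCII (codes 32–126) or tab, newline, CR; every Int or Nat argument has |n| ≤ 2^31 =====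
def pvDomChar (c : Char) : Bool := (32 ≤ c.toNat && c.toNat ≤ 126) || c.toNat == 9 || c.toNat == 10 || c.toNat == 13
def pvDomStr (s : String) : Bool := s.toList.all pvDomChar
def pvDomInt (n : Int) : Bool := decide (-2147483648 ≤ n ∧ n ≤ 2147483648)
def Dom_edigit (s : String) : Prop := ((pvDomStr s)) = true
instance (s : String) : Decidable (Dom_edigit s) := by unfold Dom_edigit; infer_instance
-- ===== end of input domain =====

-- B inverts A's loop nesting: token-outer position scans collected as (index, value) pairs and
-- sorted by index, using copy-free startswith(w, i) instead of A's per-position suffix copies s[a:]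
-- (measurably faster on large inputs).

-- ===== PORT A =====
-- one left-to-right pass over positions, testing a digit char then each spelled word
def edigit (s : String) : List Int :=
  (PySem.List.pyRange 0 (PySem.Str.len s) 1).foldl (fun digits a =>
    -- s[a]: a comes from range(len(s)) so the IndexError default is never read;
    -- int(s[a]) parses exactly when isdigit holds on the ASCII domain, default never read there
    if PySem.Chars.isdigit (PySem.List.pyGetD s.toList a ' ') then
      digits ++ [(PySem.Int.ofChars? [PySem.List.pyGetD s.toList a ' ']).getD 0]
    else if PySem.Chars.startswith (PySem.List.slice s.toList (some a) none) "one".toList then digits ++ [1]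
    else if PySem.Chars.startswith (PySem.List.slice s.toList (some a) none) "two".toList then digits ++ [2]
    else if PySem.Chars.startswith (PySem.List.slice s.toList (some a) none) "three".toList then digits ++ [3]
    else if PySem.Chars.startswith (PySem.List.slice s.toList (some a) none) "four".toList then digits ++ [4]
    else if PySem.Chars.startswith (PySem.List.slice s.toList (some a) none) "five".toList then digits ++ [5]
    else if PySem.Chars.startswith (PySem.List.slice s.toList (some a) none) "six".toList then digits ++ [6]
    else if PySem.Chars.startswith (PySem.List.slice s.toList (some a) none) "seven".toList then digits ++ [7]
    else if PySem.Chars.startswith (PySem.List.slice s.toList (some a) none) "eight".toList then digits ++ [8]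
    else if PySem.Chars.startswith (PySem.List.slice s.toList (some a) none) "nine".toList then digits ++ [9]
    else if PySem.Chars.startswith (PySem.List.slice s.toList (some a) none) "zero".toList then digits ++ [0]
    else digits) []

-- ===== PORT B =====
-- the WORDS table (a dict with distinct literal keys: its items() is this association list)
def pvWords : List (String × Int) :=
  [("one", 1), ("two", 2), ("three", 3), ("four", 4), ("five", 5),
   ("six", 6), ("seven", 7), ("eight", 8), ("nine", 9), ("zero", 0)]

def edigit_alt (s : String) : List Int :=
  -- [(i, int(c)) for i, c in enumerate(s) if c.isdigit()]
  let pairs0 : List (Int × Int) :=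
    (PySem.List.enumerate s.toList 0).filterMap (fun ic =>
      if PySem.Chars.isdigit ic.2 then
        -- int(c): parses exactly when isdigit holds on the ASCII domain; default never read there
        some (ic.1, (PySem.Int.ofChars? [ic.2]).getD 0)
      else none)
  -- for w, v in WORDS.items(): for i in range(len(s)): if s.startswith(w, i): append (i, v)
  let pairs := pvWords.foldl (fun acc wv =>
    (PySem.List.pyRange 0 (PySem.Str.len s) 1).foldl (fun acc i =>
      -- s.startswith(w, i) with 0 ≤ i: startswith on the slice s[i:]
      if PySem.Chars.startswith (PySem.List.slice s.toList (some i) none) wv.1.toList then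
        acc ++ [(i, wv.2)]
      else acc) acc) pairs0
  (PySem.List.sorted pairs (fun p => p.1) false).map (fun p => p.2)

-- ===== PRECONDITION & SPEC =====
def Spec_edigit (s : String) (out : List Int) : Prop := out = edigit_alt s
instance (s : String) (out : List Int) : Decidable (Spec_edigit s out) := by unfold Spec_edigit; infer_instance

-- ===== CLAIM (what is proved, stated in full; the proofs are below) =====
def Claim_equal_edigit : Prop := ∀ (s : String), Dom_edigit s → Spec_edigit s (edigit s)

-- ===== LEMMAS AND PROOFS =====

-- the optional value A's if/elif chain contributes at position a
def pvAval (cs : List Char) (a : Int) : Option Int :=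
  if PySem.Chars.isdigit (PySem.List.pyGetD cs a ' ') then
    some ((PySem.Int.ofChars? [PySem.List.pyGetD cs a ' ']).getD 0)
  else if PySem.Chars.startswith (PySem.List.slice cs (some a) none) "one".toList then some 1
  else if PySem.Chars.startswith (PySem.List.slice cs (some a) none) "two".toList then some 2
  else if PySem.Chars.startswith (PySem.List.slice cs (some a) none) "three".toList then some 3
  else if PySem.Chars.startswith (PySem.List.slice cs (some a) none) "four".toList then some 4
  else if PySem.Chars.startswith (PySem.List.slice cs (some a) none) "five".toList then some 5
  else if PySem.Chars.startswith (PySem.List.slice cs (some a) none) "six".toList then some 6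
  else if PySem.Chars.startswith (PySem.List.slice cs (some a) none) "seven".toList then some 7
  else if PySem.Chars.startswith (PySem.List.slice cs (some a) none) "eight".toList then some 8
  else if PySem.Chars.startswith (PySem.List.slice cs (some a) none) "nine".toList then some 9
  else if PySem.Chars.startswith (PySem.List.slice cs (some a) none) "zero".toList then some 0
  else none

-- B's two kinds of (index, value) testers
def pvDigT (cs : List Char) (i : Int) : Option (Int × Int) :=
  if PySem.Chars.isdigit (PySem.List.pyGetD cs i ' ') then
    some (i, (PySem.Int.ofChars? [PySem.List.pyGetD cs i ' ']).getD 0)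
  else none

def pvWordT (cs : List Char) (wv : String × Int) (i : Int) : Option (Int × Int) :=
  if PySem.Chars.startswith (PySem.List.slice cs (some i) none) wv.1.toList then some (i, wv.2)
  else none

-- left-biased chaining of a list of testers
def pvChain {α β : Type} (ts : List (α → Option β)) (a : α) : Option β :=
  ts.foldr (fun t acc => (t a).or acc) none

-- a foldl appending the optional contribution of each element is a filterMap
theorem pv_foldl_optList {α β : Type} (f : α → Option β) (body : List β → α → List β)
    (hb : ∀ acc a, body acc a = acc ++ (f a).toList) :
    ∀ (l : List α) (init : List β), l.foldl body init = init ++ l.filterMap f := by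
  intro l
  induction l with
  | nil => simp
  | cons a l ih =>
    intro init
    rw [List.foldl_cons, hb, ih, List.filterMap_cons]
    cases f a <;> simp
theorem pvChain_eq_none {α β : Type} (ts : List (α → Option β)) (a : α)
    (h : ∀ t ∈ ts, t a = none) : pvChain ts a = none := by
  induction ts with
  | nil => rfl
  | cons t ts ih =>
    simp only [pvChain, List.foldr_cons] at *
    rw [h t (by simp), ih (fun u hu => h u (by simp [hu])), Option.none_or]

theorem pv_perm_filterMap_or {α β : Type} (f g : α → Option β) (l : List α)
    (h : ∀ a ∈ l, f a = none ∨ g a = none) :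
    (l.filterMap (fun a => (f a).or (g a))).Perm (l.filterMap f ++ l.filterMap g) := by
  induction l with
  | nil => simp
  | cons a l ih =>
    have ih' := ih (fun x hx => h x (by simp [hx]))
    rcases h a (by simp) with hfa | hga
    · rw [List.filterMap_cons, List.filterMap_cons, hfa, Option.none_or]
      cases hga : g a with
      | none => simpa [hga] using ih'
      | some y =>
        simp only [hga, List.filterMap_cons]
        exact ((ih'.cons y).trans List.perm_middle.symm)
    · cases hfa : f a with
      | none =>
        rw [List.filterMap_cons, List.filterMap_cons, List.filterMap_cons, hfa, hga,
          Option.none_or]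
        simpa using ih'
      | some x =>
        simp only [List.filterMap_cons, hfa, hga, List.cons_append]
        exact ih'.cons x

theorem pv_perm_filterMap_chain {α β : Type} (l : List α) (ts : List (α → Option β))
    (hd : ts.Pairwise (fun t u => ∀ a ∈ l, t a = none ∨ u a = none)) :
    (l.filterMap (pvChain ts)).Perm (ts.flatMap (fun t => l.filterMap t)) := by
  induction ts with
  | nil => simp [pvChain]
  | cons t ts ih =>
    rcases List.pairwise_cons.mp hd with ⟨h1, h2⟩
    have hdis : ∀ a ∈ l, t a = none ∨ pvChain ts a = none := by
      intro a ha
      by_cases hta : t a = none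
      · exact Or.inl hta
      · exact Or.inr (pvChain_eq_none ts a (fun u hu =>
          (h1 u hu a ha).resolve_left hta))
    have hstep : l.filterMap (pvChain (t :: ts)) =
        l.filterMap (fun a => (t a).or (pvChain ts a)) := rfl
    rw [hstep, List.flatMap_cons]
    exact (pv_perm_filterMap_or t (pvChain ts) l hdis).trans
      ((ih h2).append_left (l.filterMap t))

-- A's chain at one position is the left-biased chaining of B's testers, paired with the index
theorem pvChain_eq_aval (cs : List Char) (a : Int) :
    pvChain (pvDigT cs :: pvWords.map (pvWordT cs)) a
      = (pvAval cs a).map (fun v => (a, v)) := by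
  show pvChain (pvDigT cs :: [pvWordT cs ("one", 1), pvWordT cs ("two", 2), pvWordT cs ("three", 3), pvWordT cs ("four", 4), pvWordT cs ("five", 5), pvWordT cs ("six", 6), pvWordT cs ("seven", 7), pvWordT cs ("eight", 8), pvWordT cs ("nine", 9), pvWordT cs ("zero", 0)]) a
      = (pvAval cs a).map (fun v => (a, v))
  simp only [pvChain, List.foldr_cons, List.foldr_nil]
  unfold pvDigT pvWordT pvAval
  by_cases h0 : PySem.Chars.isdigit (PySem.List.pyGetD cs a ' ') = true
  · simp only [if_pos h0]; rfl
  simp only [if_neg h0]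
  by_cases h1 : PySem.Chars.startswith (PySem.List.slice cs (some a) none) "one".toList = true
  · simp only [if_pos h1]; rfl
  simp only [if_neg h1]
  by_cases h2 : PySem.Chars.startswith (PySem.List.slice cs (some a) none) "two".toList = true
  · simp only [if_pos h2]; rfl
  simp only [if_neg h2]
  by_cases h3 : PySem.Chars.startswith (PySem.List.slice cs (some a) none) "three".toList = true
  · simp only [if_pos h3]; rfl
  simp only [if_neg h3]
  by_cases h4 : PySem.Chars.startswith (PySem.List.slice cs (some a) none) "four".toList = true
  · simp only [if_pos h4]; rfl
  simp only [if_neg h4]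
  by_cases h5 : PySem.Chars.startswith (PySem.List.slice cs (some a) none) "five".toList = true
  · simp only [if_pos h5]; rfl
  simp only [if_neg h5]
  by_cases h6 : PySem.Chars.startswith (PySem.List.slice cs (some a) none) "six".toList = true
  · simp only [if_pos h6]; rfl
  simp only [if_neg h6]
  by_cases h7 : PySem.Chars.startswith (PySem.List.slice cs (some a) none) "seven".toList = true
  · simp only [if_pos h7]; rfl
  simp only [if_neg h7]
  by_cases h8 : PySem.Chars.startswith (PySem.List.slice cs (some a) none) "eight".toList = true
  · simp only [if_pos h8]; rfl
  simp only [if_neg h8]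
  by_cases h9 : PySem.Chars.startswith (PySem.List.slice cs (some a) none) "nine".toList = true
  · simp only [if_pos h9]; rfl
  simp only [if_neg h9]
  by_cases h10 : PySem.Chars.startswith (PySem.List.slice cs (some a) none) "zero".toList = true
  · simp only [if_pos h10]; rfl
  simp only [if_neg h10]
  rfl

-- a nonempty prefix of s[i:] pins down s[i]
theorem pvPrefix_head (cs : List Char) (i : Int) (h0 : 0 ≤ i) (hc : Char) (tl : List Char)
    (hp : (hc :: tl) <+: PySem.List.slice cs (some i) none) :
    PySem.List.pyGetD cs i ' ' = hc := by
  rw [PySem.List.slice_from cs h0] at hp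
  obtain ⟨t, ht⟩ := hp
  have hget : cs[i.toNat]? = some hc := by
    rw [← List.head?_drop, ← ht]; rfl
  obtain ⟨hlt, hval⟩ := List.getElem?_eq_some_iff.mp hget
  rw [PySem.List.pyGetD_eq_getElem cs ' ' h0 (by omega)]
  exact hval

-- a digit char never starts a spelled word
theorem pvDig_word_disjoint (cs : List Char) (wv : String × Int) (hne : wv.1.toList ≠ [])
    (hdig : PySem.Chars.isdigit wv.1.toList.headI = false) (i : Int) (h0 : 0 ≤ i) :
    pvDigT cs i = none ∨ pvWordT cs wv i = none := by
  by_cases hsw : PySem.Chars.startswith (PySem.List.slice cs (some i) none) wv.1.toList = true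
  · left
    have hp := (PySem.Chars.startswith_iff _ _).mp hsw
    cases wl : wv.1.toList with
    | nil => exact absurd wl hne
    | cons hc tl =>
      rw [wl] at hp hdig
      have hhead := pvPrefix_head cs i h0 hc tl hp
      simp only [List.headI] at hdig
      simp [pvDigT, hhead, hdig]
  · right
    simp [pvWordT, hsw]

-- two distinct words, neither a prefix of the other, never both start at one position
theorem pvWord_word_disjoint (cs : List Char) (wv1 wv2 : String × Int)
    (h12 : ¬ wv1.1.toList <+: wv2.1.toList) (h21 : ¬ wv2.1.toList <+: wv1.1.toList) (i : Int) :
    pvWordT cs wv1 i = none ∨ pvWordT cs wv2 i = none := by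
  by_cases h1 : PySem.Chars.startswith (PySem.List.slice cs (some i) none) wv1.1.toList = true
  · by_cases h2 : PySem.Chars.startswith (PySem.List.slice cs (some i) none) wv2.1.toList = true
    · rcases List.prefix_or_prefix_of_prefix ((PySem.Chars.startswith_iff _ _).mp h1)
        ((PySem.Chars.startswith_iff _ _).mp h2) with h | h
      · exact absurd h h12
      · exact absurd h h21
    · right; simp [pvWordT, h2]
  · left; simp [pvWordT, h1]

-- A's pass IS the filterMap of pvAval over the index range
theorem pvA_char (s : String) :
    edigit s = (PySem.List.pyRange 0 (PySem.Str.len s) 1).filterMap (pvAval s.toList) := by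
  have h := pv_foldl_optList (pvAval s.toList)
      (fun digits a =>
        if PySem.Chars.isdigit (PySem.List.pyGetD s.toList a ' ') then
          digits ++ [(PySem.Int.ofChars? [PySem.List.pyGetD s.toList a ' ']).getD 0]
        else if PySem.Chars.startswith (PySem.List.slice s.toList (some a) none) "one".toList then digits ++ [1]
        else if PySem.Chars.startswith (PySem.List.slice s.toList (some a) none) "two".toList then digits ++ [2]
        else if PySem.Chars.startswith (PySem.List.slice s.toList (some a) none) "three".toList then digits ++ [3]
        else if PySem.Chars.startswith (PySem.List.slice s.toList (some a) none) "four".toList then digits ++ [4]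
        else if PySem.Chars.startswith (PySem.List.slice s.toList (some a) none) "five".toList then digits ++ [5]
        else if PySem.Chars.startswith (PySem.List.slice s.toList (some a) none) "six".toList then digits ++ [6]
        else if PySem.Chars.startswith (PySem.List.slice s.toList (some a) none) "seven".toList then digits ++ [7]
        else if PySem.Chars.startswith (PySem.List.slice s.toList (some a) none) "eight".toList then digits ++ [8]
        else if PySem.Chars.startswith (PySem.List.slice s.toList (some a) none) "nine".toList then digits ++ [9]
        else if PySem.Chars.startswith (PySem.List.slice s.toList (some a) none) "zero".toList then digits ++ [0]
        else digits)
      (by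
        intro acc a
        show _ = acc ++ (pvAval s.toList a).toList
        unfold pvAval
        by_cases h0 : PySem.Chars.isdigit (PySem.List.pyGetD s.toList a ' ') = true
        · simp only [if_pos h0]; rfl
        simp only [if_neg h0]
        by_cases h1 : PySem.Chars.startswith (PySem.List.slice s.toList (some a) none) "one".toList = true
        · simp only [if_pos h1]; rfl
        simp only [if_neg h1]
        by_cases h2 : PySem.Chars.startswith (PySem.List.slice s.toList (some a) none) "two".toList = true
        · simp only [if_pos h2]; rfl
        simp only [if_neg h2]
        by_cases h3 : PySem.Chars.startswith (PySem.List.slice s.toList (some a) none) "three".toList = true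
        · simp only [if_pos h3]; rfl
        simp only [if_neg h3]
        by_cases h4 : PySem.Chars.startswith (PySem.List.slice s.toList (some a) none) "four".toList = true
        · simp only [if_pos h4]; rfl
        simp only [if_neg h4]
        by_cases h5 : PySem.Chars.startswith (PySem.List.slice s.toList (some a) none) "five".toList = true
        · simp only [if_pos h5]; rfl
        simp only [if_neg h5]
        by_cases h6 : PySem.Chars.startswith (PySem.List.slice s.toList (some a) none) "six".toList = true
        · simp only [if_pos h6]; rfl
        simp only [if_neg h6]
        by_cases h7 : PySem.Chars.startswith (PySem.List.slice s.toList (some a) none) "seven".toList = true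
        · simp only [if_pos h7]; rfl
        simp only [if_neg h7]
        by_cases h8 : PySem.Chars.startswith (PySem.List.slice s.toList (some a) none) "eight".toList = true
        · simp only [if_pos h8]; rfl
        simp only [if_neg h8]
        by_cases h9 : PySem.Chars.startswith (PySem.List.slice s.toList (some a) none) "nine".toList = true
        · simp only [if_pos h9]; rfl
        simp only [if_neg h9]
        by_cases h10 : PySem.Chars.startswith (PySem.List.slice s.toList (some a) none) "zero".toList = true
        · simp only [if_pos h10]; rfl
        simp only [if_neg h10]
        simp)
      (PySem.List.pyRange 0 (PySem.Str.len s) 1) []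
  simpa [edigit] using h

-- B builds the digit-tester pairs, then one block per word, then sorts by index
theorem pvB_char (s : String) :
    edigit_alt s =
      (PySem.List.sorted
        ((PySem.List.pyRange 0 (PySem.Str.len s) 1).filterMap (pvDigT s.toList)
          ++ pvWords.flatMap (fun wv =>
               (PySem.List.pyRange 0 (PySem.Str.len s) 1).filterMap (pvWordT s.toList wv)))
        (fun p => p.1) false).map (fun p => p.2) := by
  have hpairs0 : (PySem.List.enumerate s.toList 0).filterMap (fun ic =>
        if PySem.Chars.isdigit ic.2 then
          some (ic.1, (PySem.Int.ofChars? [ic.2]).getD 0)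
        else none)
      = (PySem.List.pyRange 0 (PySem.Str.len s) 1).filterMap (pvDigT s.toList) := by
    rw [PySem.List.enumerate_eq_map_pyRange s.toList ' ', List.filterMap_map,
      PySem.List.len_eq, ← PySem.Str.len_eq]
    rfl
  have hinner : ∀ (wv : String × Int) (acc : List (Int × Int)),
      (PySem.List.pyRange 0 (PySem.Str.len s) 1).foldl (fun acc i =>
        if PySem.Chars.startswith (PySem.List.slice s.toList (some i) none) wv.1.toList then
          acc ++ [(i, wv.2)]
        else acc) acc
      = acc ++ (PySem.List.pyRange 0 (PySem.Str.len s) 1).filterMap (pvWordT s.toList wv) :=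
    fun wv acc => pv_foldl_optList (pvWordT s.toList wv) _
      (by
        intro acc i
        unfold pvWordT
        by_cases h : PySem.Chars.startswith (PySem.List.slice s.toList (some i) none) wv.1.toList = true
        · simp only [if_pos h]; rfl
        · simp only [if_neg h]; simp) _ acc
  have houter : (fun (acc : List (Int × Int)) (wv : String × Int) =>
        (PySem.List.pyRange 0 (PySem.Str.len s) 1).foldl (fun acc i =>
          if PySem.Chars.startswith (PySem.List.slice s.toList (some i) none) wv.1.toList then
            acc ++ [(i, wv.2)]
          else acc) acc)
      = (fun acc wv =>
          acc ++ (PySem.List.pyRange 0 (PySem.Str.len s) 1).filterMap (pvWordT s.toList wv)) := by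
    funext acc wv; exact hinner wv acc
  simp only [edigit_alt, hpairs0, houter, PySem.List.foldl_append_eq_flatMap]

-- ===== VERDICT (by name: the statement is the Claim_ definition above) =====
theorem edigit_spec : Claim_equal_edigit := by
  intro s _
  unfold Spec_edigit
  set cs := s.toList with hcs
  set l := PySem.List.pyRange 0 (PySem.Str.len s) 1 with hl
  set ts := pvDigT cs :: pvWords.map (pvWordT cs) with hts
  set L := l.filterMap (fun i => (pvAval cs i).map (fun v => (i, v))) with hL
  -- the testers are pairwise disjoint at every position of the range
  have hpw : pvWords.Pairwise
      (fun a b => ¬ a.1.toList <+: b.1.toList ∧ ¬ b.1.toList <+: a.1.toList) := by decide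
  have hd : ts.Pairwise (fun t u => ∀ a ∈ l, t a = none ∨ u a = none) := by
    rw [hts, List.pairwise_cons]
    constructor
    · intro u hu a ha
      obtain ⟨wv, hwv, rfl⟩ := List.mem_map.mp hu
      have h0 : 0 ≤ a := (PySem.List.mem_pyRange_one.mp ha).1
      fin_cases hwv <;> exact pvDig_word_disjoint cs _ (by decide) (by decide) a h0
    · exact List.Pairwise.map (pvWordT cs)
        (fun a b hab i _ => pvWord_word_disjoint cs a b hab.1 hab.2 i) hpw
  have hperm := pv_perm_filterMap_chain l ts hd
  have hLchain : l.filterMap (pvChain ts) = L :=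
    List.filterMap_congr (fun i _ => pvChain_eq_aval cs i)
  have hflat : ts.flatMap (fun t => l.filterMap t)
      = l.filterMap (pvDigT cs) ++ pvWords.flatMap (fun wv => l.filterMap (pvWordT cs wv)) := by
    rw [hts, List.flatMap_cons, List.flatMap_map]
  rw [hLchain, hflat] at hperm
  -- L is strictly increasing in the index component
  have hLpw : L.Pairwise (fun p q => p.1 < q.1) := by
    refine List.Pairwise.filterMap _ ?_ (PySem.List.pairwise_lt_pyRange_one 0 (PySem.Str.len s))
    intro a b hab x hx y hy
    obtain ⟨u, hu, rfl⟩ := Option.map_eq_some_iff.mp hx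
    obtain ⟨w, hw, rfl⟩ := Option.map_eq_some_iff.mp hy
    exact hab
  have hsorted := PySem.List.sorted_eq_of_perm_of_pairwise_lt
      (l.filterMap (pvDigT cs) ++ pvWords.flatMap (fun wv => l.filterMap (pvWordT cs wv)))
      L (fun p => p.1) hperm hLpw
  rw [pvA_char s, pvB_char s, ← hl, ← hcs, hsorted, hL, List.map_filterMap]
  exact (List.filterMap_congr (fun i _ => by cases pvAval cs i <;> rfl)).symm
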